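-- pv_equiv track=rewrite | github.com/wframe/421_Final | src/test.py | pos_verbs
-- ===== SOURCE A (Python) =====
-- from itertools import tee, islice, chain, izip
--
-- def previous_and_next(some_iterable):
--     prevs, items, nexts = tee(some_iterable, 3)
--     prevs = chain([None], prevs)
--     nexts = chain(islice(nexts, 1, None), [None])
--     return izip(prevs, items, nexts)
--
-- def pos_verbs(tags):
--     errors = 0
--     present = True
--     if "VBN" in tags or "VBD" in tags:
--         present = False
--
--     verb_count = 0
--     pres_tags = ['VB','VBZ','VBP','VBG']
--     verb_tags = ["VB", "VBD", "VBG", "VBN", "VBP", "VBZ"]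
--     for previous, current, nxt in  previous_and_next(tags):
--         if not present and current in pres_tags:
--             errors += 1
--         else:
--             errors -= 1
--
--         if current in verb_tags:
--             verb_count += 1
--         elif current == "CC":
--             if verb_count == 0:
--                 errors += 6
--             verb_count = 0
--
--     if verb_count == 0:
--         errors += 3
--     return errors
-- ===== SOURCE B (Python) =====
-- def pos_verbs(tags):
--     # tense score in closed form; conjunction score by splitting tags on "CC":
--     # each CC whose preceding segment holds no verb costs +6, and the trailing
--     # segment with no verb costs +3 (equivalent to A's verb_count/reset loop,
--     # since verb_count at a CC is exactly the number of verbs in the segment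
--     # before it).
--     pres = ("VB", "VBZ", "VBP", "VBG")
--     if "VBN" in tags or "VBD" in tags:
--         errors = 2 * sum(t in pres for t in tags) - len(tags)
--     else:
--         errors = -len(tags)
--
--     verbs = ("VB", "VBD", "VBG", "VBN", "VBP", "VBZ")
--     segs = []
--     cur = []
--     for t in tags:
--         if t == "CC":
--             segs.append(cur)
--             cur = []
--         else:
--             cur.append(t)
--     errors += 6 * sum(1 for s in segs if not any(t in verbs for t in s))
--     if not any(t in verbs for t in cur):
--         errors += 3
--     return errors
-- ===== Notes on version B (the rewrite author's own statement) =====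
-- stated objective: alternative
-- what changed: Replaces A's single stateful loop (with the dead previous_and_next machinery and a running verb_count with resets) by a closed-form tense score plus splitting the tags on "CC" into segments and charging 6 per verb-free segment before a CC and 3 for a verb-free trailing segment.
import Mathlib
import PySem

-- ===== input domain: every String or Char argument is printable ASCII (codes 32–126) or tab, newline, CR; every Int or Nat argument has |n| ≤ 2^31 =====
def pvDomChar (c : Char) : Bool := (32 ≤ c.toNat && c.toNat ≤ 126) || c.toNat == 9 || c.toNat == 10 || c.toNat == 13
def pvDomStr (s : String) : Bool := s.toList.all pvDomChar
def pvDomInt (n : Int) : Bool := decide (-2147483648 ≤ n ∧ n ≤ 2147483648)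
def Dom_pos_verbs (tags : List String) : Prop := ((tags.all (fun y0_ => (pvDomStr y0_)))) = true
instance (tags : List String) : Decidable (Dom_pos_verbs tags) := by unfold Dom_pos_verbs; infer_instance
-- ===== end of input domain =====

-- B replaces A's single stateful loop (running verb_count with resets; the
-- previous_and_next helper is dead code — `previous`/`nxt` are never read) by a
-- closed-form tense score plus a split of the tags on "CC" into segments, each
-- scored for verb-emptiness (objective: alternative).

-- ===== PORT A =====
-- loop body of A: state is (errors, verb_count); `presentNeg` is the loop-constant
-- value of Python's `not present`
def pvStepA (presentNeg : Bool) (st : Int × Int) (current : String) : Int × Int :=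
  let errors := st.1
  let verb_count := st.2
  let errors :=
    if presentNeg && ["VB","VBZ","VBP","VBG"].contains current then errors + 1
    else errors - 1
  if ["VB","VBD","VBG","VBN","VBP","VBZ"].contains current then (errors, verb_count + 1)
  else if current == "CC" then
    (if verb_count == 0 then errors + 6 else errors, 0)
  else (errors, verb_count)

def pos_verbs (tags : List String) : Int :=
  -- present = True; if "VBN" in tags or "VBD" in tags: present = False
  let presentNeg := tags.contains "VBN" || tags.contains "VBD"
  let st := tags.foldl (pvStepA presentNeg) ((0 : Int), (0 : Int))
  if st.2 == 0 then st.1 + 3 else st.1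

-- ===== PORT B =====
-- `not any(t in verbs for t in s)`
def pvNoVerb (s : List String) : Bool :=
  !(s.any (fun t => ["VB","VBD","VBG","VBN","VBP","VBZ"].contains t))

-- loop body of B's split on "CC": state is (segs, cur)
def pvStepSeg (st : List (List String) × List String) (t : String) :
    List (List String) × List String :=
  if t == "CC" then (st.1 ++ [st.2], []) else (st.1, st.2 ++ [t])

def pos_verbs_alt (tags : List String) : Int :=
  let has_past := tags.contains "VBN" || tags.contains "VBD"
  let errors : Int :=
    if has_past then
      2 * ((tags.countP (fun t => ["VB","VBZ","VBP","VBG"].contains t) : Nat) : Int)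
        - (tags.length : Int)
    else -(tags.length : Int)
  let st := tags.foldl pvStepSeg ([], [])
  let errors := errors + 6 * ((st.1.countP pvNoVerb : Nat) : Int)
  if pvNoVerb st.2 then errors + 3 else errors

-- ===== PRECONDITION & SPEC =====
def Spec_pos_verbs (tags : List String) (out : Int) : Prop := out = pos_verbs_alt tags
instance (tags : List String) (out : Int) : Decidable (Spec_pos_verbs tags out) := by unfold Spec_pos_verbs; infer_instance

-- ===== CLAIM (what is proved, stated in full; the proofs are below) =====
def Claim_equal_pos_verbs : Prop := ∀ (tags : List String), Dom_pos_verbs tags → Spec_pos_verbs tags (pos_verbs tags)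

-- ===== LEMMAS AND PROOFS =====

-- per-element ±1 contribution of A's first branch
def pvDelta (p : Bool) (t : String) : Int :=
  if p && ["VB","VBZ","VBP","VBG"].contains t then 1 else -1

def pvDeltaSum (p : Bool) (tags : List String) : Int :=
  (tags.map (pvDelta p)).sum

-- verb count of a segment, as A's verb_count sees it
def pvCV (s : List String) : Int :=
  ((s.countP (fun t => ["VB","VBD","VBG","VBN","VBP","VBZ"].contains t) : Nat) : Int)

lemma pvCV_nil : pvCV ([] : List String) = 0 := rfl

lemma pvCV_zero_iff (s : List String) : (pvCV s = 0) ↔ pvNoVerb s = true := by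
  simp [pvCV, pvNoVerb, List.countP_eq_zero]

lemma pvDeltaSum_cons (p : Bool) (t : String) (ts : List String) :
    pvDeltaSum p (t :: ts) = pvDelta p t + pvDeltaSum p ts := by
  simp [pvDeltaSum]

lemma pvDeltaSum_false (tags : List String) :
    pvDeltaSum false tags = -(tags.length : Int) := by
  induction tags with
  | nil => simp [pvDeltaSum]
  | cons t ts ih => simp [pvDeltaSum, pvDelta] at *; omega

lemma pvDeltaSum_true (tags : List String) :
    pvDeltaSum true tags =
      2 * ((tags.countP (fun t => ["VB","VBZ","VBP","VBG"].contains t) : Nat) : Int)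
        - (tags.length : Int) := by
  induction tags with
  | nil => simp [pvDeltaSum]
  | cons t ts ih =>
    rw [pvDeltaSum_cons, ih, List.countP_cons, List.length_cons]
    by_cases h : (["VB","VBZ","VBP","VBG"].contains t) = true
    · have hd : pvDelta true t = 1 := by unfold pvDelta; rw [Bool.true_and, if_pos h]
      rw [hd]
      simp only [h, if_true]
      push_cast; omega
    · have hd : pvDelta true t = -1 := by unfold pvDelta; rw [Bool.true_and, if_neg h]
      rw [hd]
      have h' : (["VB","VBZ","VBP","VBG"].contains t) = false := Bool.eq_false_iff.mpr h
      simp only [h', Bool.false_eq_true, if_false]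
      push_cast; omega

-- the core invariant: A's fold over (errors, verb_count) versus B's fold over (segs, cur)
lemma pvFold_rel (p : Bool) (tags : List String) :
    ∀ (e : Int) (segs : List (List String)) (cur : List String),
    tags.foldl (pvStepA p) (e, pvCV cur) =
      (e + pvDeltaSum p tags
         + 6 * (((tags.foldl pvStepSeg (segs, cur)).1.countP pvNoVerb : Int)
                - (segs.countP pvNoVerb : Int)),
       pvCV (tags.foldl pvStepSeg (segs, cur)).2) := by
  induction tags with
  | nil => intro e segs cur; simp [pvDeltaSum]
  | cons t ts ih =>
    intro e segs cur
    simp only [List.foldl_cons]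
    by_cases hcc : t = "CC"
    · subst hcc
      have hd : pvDelta p "CC" = -1 := by cases p <;> rfl
      have hB : pvStepSeg (segs, cur) "CC" = (segs ++ [cur], []) := by
        simp [pvStepSeg]
      by_cases hz : pvCV cur = 0
      · have hnv : pvNoVerb cur = true := (pvCV_zero_iff cur).mp hz
        have hA : pvStepA p (e, pvCV cur) "CC" = (e - 1 + 6, pvCV []) := by
          simp [pvStepA, hz, pvCV_nil]
        rw [hA, hB, ih (e - 1 + 6) (segs ++ [cur]) []]
        have hc : (segs ++ [cur]).countP pvNoVerb = segs.countP pvNoVerb + 1 := by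
          simp [List.countP_append, hnv]
        rw [hc, pvDeltaSum_cons, hd]
        simp only [Prod.mk.injEq, and_true]
        push_cast; ring
      · have hnv : pvNoVerb cur = false := by
          cases h : pvNoVerb cur
          · rfl
          · exact absurd ((pvCV_zero_iff cur).mpr h) hz
        have hA : pvStepA p (e, pvCV cur) "CC" = (e - 1, pvCV []) := by
          simp [pvStepA, hz, pvCV_nil]
        rw [hA, hB, ih (e - 1) (segs ++ [cur]) []]
        have hc : (segs ++ [cur]).countP pvNoVerb = segs.countP pvNoVerb := by
          simp [List.countP_append, hnv]
        rw [hc, pvDeltaSum_cons, hd]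
        simp only [Prod.mk.injEq, and_true]
        ring
    · have hB : pvStepSeg (segs, cur) t = (segs, cur ++ [t]) := by
        simp [pvStepSeg, hcc]
      have hbe : ¬((t == "CC") = true) := by simp [hcc]
      by_cases hv : (["VB","VBD","VBG","VBN","VBP","VBZ"].contains t) = true
      · have hcur : pvCV (cur ++ [t]) = pvCV cur + 1 := by
          unfold pvCV
          rw [List.countP_append]
          simp only [List.countP_cons, List.countP_nil, hv, if_true]
          push_cast; ring
        have hA : pvStepA p (e, pvCV cur) t = (e + pvDelta p t, pvCV (cur ++ [t])) := by
          simp only [pvStepA]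
          rw [if_pos hv, hcur]
          unfold pvDelta
          by_cases hq : (p && ["VB","VBZ","VBP","VBG"].contains t) = true
          · rw [if_pos hq, if_pos hq]
          · rw [if_neg hq, if_neg hq]
            simp only [Prod.mk.injEq, and_true]; ring
        rw [hA, hB, ih (e + pvDelta p t) segs (cur ++ [t]), pvDeltaSum_cons]
        simp only [Prod.mk.injEq, and_true]
        ring
      · have hv' : (["VB","VBD","VBG","VBN","VBP","VBZ"].contains t) = false :=
          Bool.eq_false_iff.mpr hv
        have hcur : pvCV (cur ++ [t]) = pvCV cur := by
          unfold pvCV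
          rw [List.countP_append]
          simp only [List.countP_cons, List.countP_nil, hv', Bool.false_eq_true, if_false]
          push_cast; ring
        have hA : pvStepA p (e, pvCV cur) t = (e + pvDelta p t, pvCV (cur ++ [t])) := by
          simp only [pvStepA]
          rw [if_neg hv, if_neg hbe, hcur]
          unfold pvDelta
          by_cases hq : (p && ["VB","VBZ","VBP","VBG"].contains t) = true
          · rw [if_pos hq, if_pos hq]
          · rw [if_neg hq, if_neg hq]
            simp only [Prod.mk.injEq, and_true]; ring
        rw [hA, hB, ih (e + pvDelta p t) segs (cur ++ [t]), pvDeltaSum_cons]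
        simp only [Prod.mk.injEq, and_true]
        ring

-- ===== VERDICT (by name: the statement is the Claim_ definition above) =====
theorem pos_verbs_spec : Claim_equal_pos_verbs := by
  intro tags _
  unfold Spec_pos_verbs
  simp only [pos_verbs, pos_verbs_alt]
  have hF := pvFold_rel (tags.contains "VBN" || tags.contains "VBD") tags 0 [] []
  rw [pvCV_nil] at hF
  simp only [List.countP_nil, Nat.cast_zero, sub_zero, zero_add] at hF
  rw [hF]
  have hbase :
      (if (tags.contains "VBN" || tags.contains "VBD") = true then
        2 * ((tags.countP (fun t => ["VB","VBZ","VBP","VBG"].contains t) : Nat) : Int)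
          - (tags.length : Int)
       else -(tags.length : Int))
        = pvDeltaSum (tags.contains "VBN" || tags.contains "VBD") tags := by
    cases h : (tags.contains "VBN" || tags.contains "VBD") <;>
      simp [pvDeltaSum_true, pvDeltaSum_false]
  rw [hbase]
  set st := tags.foldl pvStepSeg ([], []) with hst
  by_cases hz : pvCV st.2 = 0
  · have hnv : pvNoVerb st.2 = true := (pvCV_zero_iff st.2).mp hz
    have hb : (pvCV st.2 == 0) = true := by simp [hz]
    rw [if_pos hb, if_pos hnv]
  · have hnv : pvNoVerb st.2 = false := by
      cases h : pvNoVerb st.2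
      · rfl
      · exact absurd ((pvCV_zero_iff st.2).mpr h) hz
    have hb : ¬((pvCV st.2 == 0) = true) := by simp [hz]
    have hnv' : ¬(pvNoVerb st.2 = true) := by simp [hnv]
    rw [if_neg hb, if_neg hnv']
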